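-- pv_equiv track=rewrite | github.com/fineman999/Algorithm | Programmers/Kit/Brute_Force/divide_the_power_grid_into_two.py | bfs
-- ===== SOURCE A (Python) =====
-- from collections import deque
--
-- def bfs(graph, visited, start, n):
--     visited[start] = True
--     q = deque()
--     q.append(start)
--
--     while q:
--         popleft = q.popleft()
--         for i in graph[popleft]:
--             if not visited[i]:
--                 visited[i] = True
--                 q.append(i)
--     cnt = visited[1:].count(True)
--     second_cnt = n - cnt
--     return abs(cnt - second_cnt)
-- ===== SOURCE B (Python) =====
-- def bfs(graph, visited, start, n):
--     visited[start] = True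
--     stack = list(graph[start])
--     while stack:
--         node = stack.pop()
--         if not visited[node]:
--             visited[node] = True
--             stack += graph[node]
--     cnt = sum(visited[1:])
--     return abs(2 * cnt - n)
-- ===== Notes on version B (the rewrite author's own statement) =====
-- stated objective: alternative
-- what changed: Replaces the FIFO breadth-first search (deque, mark-on-enqueue with an inner membership test) by a depth-first traversal over an explicit stack seeded with start's adjacency row, marking on pop and pushing whole rows, and computes the answer as abs(2*cnt - n) from sum(visited[1:]).
-- outside the precondition, e.g. on bfs([[1, -3], [2], []], [False, False, False, False], 0, 0): A returns 4, B returns 2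
import Mathlib
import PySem

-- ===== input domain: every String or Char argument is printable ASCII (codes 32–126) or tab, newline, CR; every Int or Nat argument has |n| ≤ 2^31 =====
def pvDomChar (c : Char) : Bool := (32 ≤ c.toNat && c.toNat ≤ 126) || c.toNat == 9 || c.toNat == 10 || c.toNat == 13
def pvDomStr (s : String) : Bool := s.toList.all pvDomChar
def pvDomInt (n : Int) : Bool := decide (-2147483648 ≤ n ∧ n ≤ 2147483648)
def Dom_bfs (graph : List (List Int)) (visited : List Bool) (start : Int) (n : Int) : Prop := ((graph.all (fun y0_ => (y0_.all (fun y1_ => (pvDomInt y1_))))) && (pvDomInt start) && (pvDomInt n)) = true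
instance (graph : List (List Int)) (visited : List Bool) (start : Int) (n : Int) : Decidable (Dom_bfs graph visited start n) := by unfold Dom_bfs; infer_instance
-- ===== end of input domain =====

-- B replaces the FIFO BFS by a mark-on-pop stack DFS and computes abs(2*cnt-n); equivalence is about
-- the RETURN value only (both Pythons mutate `visited` in place, and their final `visited` agree on Pre_).

-- termination helpers cited by the ports' decreasing_by (they are about the ports, not the claim)
theorem pv_flip (v : List Bool) (i : Int) (h : PySem.List.pyGet? v i = some false) :
    (PySem.List.pySetD v i true).count false + 1 = v.count false := by
  rcases hk : PySem.List.pyIdx? v.length i with _ | k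
  · simp [PySem.List.pyGet?, hk] at h
  · have hget : v[k]? = some false := by simpa [PySem.List.pyGet?, hk] using h
    have hklt : k < v.length := by
      rcases List.getElem?_eq_some_iff.1 hget with ⟨h1, _⟩; exact h1
    have hvk : v[k] = false := by
      rcases List.getElem?_eq_some_iff.1 hget with ⟨_, h2⟩; exact h2
    have hset : PySem.List.pySetD v i true = v.set k true := by
      simp [PySem.List.pySetD, PySem.List.pySet?, hk]
    rw [hset, List.count_set hklt]
    have hpos : 0 < v.count false := List.count_pos_iff.2 (by
      have := List.getElem_mem hklt; rwa [hvk] at this)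
    simp [hvk]
    omega

-- ===== PORT A =====
-- inner 'for i in graph[popleft]' loop of A ('if not visited[i]: visited[i]=True; q.append(i)');
-- an out-of-range i (Python IndexError, excluded by Pre_) is skipped
def bfsVisit (visited : List Bool) (q : List Int) (row : List Int) : List Bool × List Int :=
  row.foldl (fun s i =>
    match PySem.List.pyGet? s.1 i with
    | some false => (PySem.List.pySetD s.1 i true, s.2 ++ [i])
    | _ => s) (visited, q)

theorem pv_visit_measure (row : List Int) : ∀ (v : List Bool) (q : List Int),
    (bfsVisit v q row).1.count false + (bfsVisit v q row).2.length ≤ v.count false + q.length := by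
  induction row with
  | nil => intro v q; simp [bfsVisit]
  | cons x t ih =>
    intro v q
    show (bfsVisit _ _ t).1.count false + (bfsVisit _ _ t).2.length ≤ _
    rcases h : PySem.List.pyGet? v x with _ | b
    · simpa [bfsVisit, h] using ih v q
    · cases b
      · have := ih (PySem.List.pySetD v x true) (q ++ [x])
        have hf := pv_flip v x h
        simp [bfsVisit, h] at this ⊢
        omega
      · simpa [bfsVisit, h] using ih v q

-- the 'while q' loop of A; popleft = head, appends go to the back (FIFO).
-- an out-of-range popleft (Python IndexError on graph[popleft], excluded by Pre_) stops
def bfsLoop (graph : List (List Int)) (visited : List Bool) (q : List Int) : List Bool :=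
  match q with
  | [] => visited
  | a :: rest =>
    match PySem.List.pyGet? graph a with
    | none => visited
    | some row => bfsLoop graph (bfsVisit visited rest row).1 (bfsVisit visited rest row).2
termination_by visited.count false + q.length
decreasing_by
  have := pv_visit_measure row visited rest
  simp only [List.length_cons]
  omega

def bfs (graph : List (List Int)) (visited : List Bool) (start : Int) (n : Int) : Int :=
  -- visited[start] = True  (IndexError when start is out of range: excluded by Pre_)
  let v1 := PySem.List.pySetD visited start true
  let vf := bfsLoop graph v1 [start]
  let cnt : Int := ((PySem.List.slice vf (some 1) none).count true : Nat)
  let second_cnt : Int := n - cnt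
  |cnt - second_cnt|

-- ===== PORT B =====
-- longest adjacency row of the graph (termination measure ingredient for the stack loop)
def pvMaxRow (graph : List (List Int)) : Nat := graph.foldl (fun m row => max m row.length) 0

theorem pv_rowLen_le (graph : List (List Int)) (a : Int) (row : List Int)
    (h : PySem.List.pyGet? graph a = some row) : row.length ≤ pvMaxRow graph := by
  have hmem : row ∈ graph := PySem.List.mem_of_pyGet?_eq_some _ h
  have h2 := (PySem.List.le_foldl_max_nat graph List.length 0).2 row hmem
  exact h2

-- the 'while stack' loop of B: node = stack.pop() (last element); mark on pop, push the whole row.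
-- out-of-range node (Python IndexError on visited[node] / graph[node], excluded by Pre_) stops
def dfsLoop (graph : List (List Int)) (visited : List Bool) (stack : List Int) : List Bool :=
  match stack with
  | [] => visited
  | x :: xs =>
    -- node = stack.pop(): node is the last element, the rest of the stack is dropLast
    match h1 : PySem.List.pyGet? visited ((x :: xs).getLast (List.cons_ne_nil x xs)) with
    | none => visited
    | some true => dfsLoop graph visited ((x :: xs).dropLast)
    | some false =>
      match h2 : PySem.List.pyGet? graph ((x :: xs).getLast (List.cons_ne_nil x xs)) with
      | none => PySem.List.pySetD visited ((x :: xs).getLast (List.cons_ne_nil x xs)) true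
      | some row =>
        dfsLoop graph (PySem.List.pySetD visited ((x :: xs).getLast (List.cons_ne_nil x xs)) true)
          ((x :: xs).dropLast ++ row)
termination_by visited.count false * (pvMaxRow graph + 1) + stack.length
decreasing_by
  · simp only [List.length_dropLast, List.length_cons]
    omega
  · have hf := pv_flip visited ((x :: xs).getLast (List.cons_ne_nil x xs)) h1
    have hr := pv_rowLen_le graph ((x :: xs).getLast (List.cons_ne_nil x xs)) row h2
    simp only [List.length_append, List.length_dropLast, List.length_cons]
    rw [← hf]
    have hexp : ((PySem.List.pySetD visited ((x :: xs).getLast (List.cons_ne_nil x xs)) true).count false + 1) * (pvMaxRow graph + 1) = (PySem.List.pySetD visited ((x :: xs).getLast (List.cons_ne_nil x xs)) true).count false * (pvMaxRow graph + 1) + (pvMaxRow graph + 1) := by ring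
    omega

def bfs_alt (graph : List (List Int)) (visited : List Bool) (start : Int) (n : Int) : Int :=
  -- visited[start] = True; stack = list(graph[start])  (IndexError excluded by Pre_)
  let v1 := PySem.List.pySetD visited start true
  match PySem.List.pyGet? graph start with
  | none => 0  -- unreachable under Pre_ (Python raises IndexError)
  | some row0 =>
    let vf := dfsLoop graph v1 row0
    let cnt : Int := ((PySem.List.slice vf (some 1) none).map (fun b => if b then (1 : Int) else 0)).sum
    |2 * cnt - n|

-- ===== PRECONDITION & SPEC =====
-- Pre_ admits (i) well-formed inputs (canonical indices in range, visited as long as the graph asks) and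
-- (ii) inputs whose search stops at depth one (every neighbour of start already visited), where order cannot
-- matter.  It excludes inputs where Python indexing raises IndexError, and deeper searches that only "work"
-- through negative-index wraparound or a visited/graph length mismatch: there A's value is an accident of
-- aliased cells and traversal order (see cites), and B's stack order can legitimately differ.
def Pre_bfs (graph : List (List Int)) (visited : List Bool) (start : Int) (n : Int) : Prop :=
  (visited.length = graph.length ∧ 0 ≤ start ∧ start < (graph.length : Int) ∧
    ∀ row ∈ graph, ∀ i ∈ row, 0 ≤ i ∧ i < (graph.length : Int)) ∨
  (PySem.Raise.InRange graph.length start ∧ PySem.Raise.InRange visited.length start ∧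
    ∀ i ∈ (PySem.List.pyGet? graph start).getD [],
      PySem.List.pyGet? (PySem.List.pySetD visited start true) i = some true)
instance (graph : List (List Int)) (visited : List Bool) (start : Int) (n : Int) : Decidable (Pre_bfs graph visited start n) := by unfold Pre_bfs; infer_instance
def pvWitness_bfs : List (List Int) × List Bool × Int × Int := ([[1], [0]], [false, false], 0, 2)

def Spec_bfs (graph : List (List Int)) (visited : List Bool) (start : Int) (n : Int) (out : Int) : Prop := out = bfs_alt graph visited start n
instance (graph : List (List Int)) (visited : List Bool) (start : Int) (n : Int) (out : Int) : Decidable (Spec_bfs graph visited start n out) := by unfold Spec_bfs; infer_instance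

-- ===== CLAIM (what is proved, stated in full; the proofs are below) =====
def Claim_equal_bfs : Prop := ∀ (graph : List (List Int)) (visited : List Bool) (start : Int) (n : Int), Dom_bfs graph visited start n → Pre_bfs graph visited start n → Spec_bfs graph visited start n (bfs graph visited start n)

-- ===== LEMMAS AND PROOFS =====

-- mark lookup: cell of index c, out of range reads as marked
def mk (v : List Bool) (c : Int) : Bool := (PySem.List.pyGet? v c).getD true

-- usable edge: b is an (initially-unmarked-in-v) neighbour of a
def Edge (g : List (List Int)) (v : List Bool) (a b : Int) : Prop :=
  (∃ row, PySem.List.pyGet? g a = some row ∧ b ∈ row) ∧ mk v b = false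

def Reach (g : List (List Int)) (v : List Bool) (a b : Int) : Prop :=
  Relation.ReflTransGen (Edge g v) a b

def GoodG (g : List (List Int)) : Prop := ∀ row ∈ g, ∀ i ∈ row, 0 ≤ i ∧ i < (g.length : Int)

theorem mk_natCast (v : List Bool) (j : Nat) (h : j < v.length) : mk v (j : Int) = v[j] := by
  simp [mk, PySem.List.pyGet?_natCast, List.getElem?_eq_getElem h]

theorem mk_of_ge (v : List Bool) (c : Int) (h0 : 0 ≤ c) (h : (v.length : Int) ≤ c) : mk v c = true := by
  have hnone : PySem.List.pyIdx? v.length c = none := by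
    simp only [PySem.List.pyIdx?]
    split_ifs <;> first | rfl | omega
  simp [mk, PySem.List.pyGet?, hnone]

theorem mk_in (v : List Bool) (c : Int) (h0 : 0 ≤ c) (h1 : c < (v.length : Int)) :
    mk v c = v[c.toNat]'(by omega) := by
  have hidx : PySem.List.pyIdx? v.length c = some c.toNat := by
    simp only [PySem.List.pyIdx?]
    rw [if_pos h0, if_pos h1]
  simp [mk, PySem.List.pyGet?, hidx, List.getElem?_eq_getElem (show c.toNat < v.length by omega)]

theorem mk_pySetD (v : List Bool) (i c : Int) (hi : 0 ≤ i) (hc : 0 ≤ c) (hil : i < (v.length : Int)) :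
    mk (PySem.List.pySetD v i true) c = (mk v c || decide (c = i)) := by
  have hset : PySem.List.pySetD v i true = v.set i.toNat true := PySem.List.pySetD_of_nonneg v true hi
  rw [hset]
  by_cases hcl : c < (v.length : Int)
  · have h1 : mk v c = v[c.toNat]'(by omega) := mk_in v c hc hcl
    have h2 : mk (v.set i.toNat true) c = (v.set i.toNat true)[c.toNat]'(by simp; omega) :=
      mk_in _ c hc (by simp; omega)
    rw [h1, h2]
    by_cases he : c = i
    · subst he
      rw [List.getElem_set_self]
      simp
    · have hne : c.toNat ≠ i.toNat := by omega
      rw [List.getElem_set_ne (by omega)]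
      simp [he]
  · have hlen : ((v.set i.toNat true).length : Int) ≤ c := by simp; omega
    rw [mk_of_ge _ _ hc hlen, mk_of_ge v c hc (by omega)]
    simp

theorem mk_mono_set (v : List Bool) (i c : Int) (h : mk v c = true) :
    mk (PySem.List.pySetD v i true) c = true := by
  rcases hk : PySem.List.pyIdx? v.length i with _ | k
  · simpa [PySem.List.pySetD, PySem.List.pySet?, hk] using h
  · have hset : PySem.List.pySetD v i true = v.set k true := by
      simp [PySem.List.pySetD, PySem.List.pySet?, hk]
    rw [hset]
    rcases hc : PySem.List.pyIdx? (v.set k true).length c with _ | m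
    · have hc2 : PySem.List.pyIdx? v.length c = none := by simpa using hc
      simp [mk, PySem.List.pyGet?, hc2]
    · have hc' : PySem.List.pyIdx? v.length c = some m := by simpa using hc
      have hm : m < v.length := by
        simp only [PySem.List.pyIdx?] at hc'
        split_ifs at hc' <;> simp_all <;> omega
      have hvm : v[m] = true := by
        have : mk v c = v[m] := by
          simp [mk, PySem.List.pyGet?, hc', List.getElem?_eq_getElem hm]
        rwa [this] at h
      have hm2 : m < (v.set k true).length := by simpa using hm
      have hgoal : mk (v.set k true) c = (v.set k true)[m] := by
        simp [mk, PySem.List.pyGet?, hc', List.getElem?_eq_getElem hm2]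
      rw [hgoal]
      rcases eq_or_ne m k with rfl | hne
      · simp
      · rw [List.getElem_set_ne (by omega)]
        exact hvm

theorem length_pySetD' (v : List Bool) (i : Int) (b : Bool) :
    (PySem.List.pySetD v i b).length = v.length := by
  rcases hk : PySem.List.pyIdx? v.length i with _ | k <;>
    simp [PySem.List.pySetD, PySem.List.pySet?, hk]

-- bfsVisit doesn't look at its accumulator q except to append
def vAfter (v : List Bool) (row : List Int) : List Bool := (bfsVisit v [] row).1
def appOf (v : List Bool) (row : List Int) : List Int := (bfsVisit v [] row).2

theorem bfsVisit_cons_false (v : List Bool) (q : List Int) (x : Int) (t : List Int)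
    (h : PySem.List.pyGet? v x = some false) :
    bfsVisit v q (x :: t) = bfsVisit (PySem.List.pySetD v x true) (q ++ [x]) t := by
  simp [bfsVisit, h]

theorem bfsVisit_cons_true (v : List Bool) (q : List Int) (x : Int) (t : List Int)
    (h : PySem.List.pyGet? v x = some true) :
    bfsVisit v q (x :: t) = bfsVisit v q t := by
  simp [bfsVisit, h]

theorem bfsVisit_cons_none (v : List Bool) (q : List Int) (x : Int) (t : List Int)
    (h : PySem.List.pyGet? v x = none) :
    bfsVisit v q (x :: t) = bfsVisit v q t := by
  simp [bfsVisit, h]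

theorem bfsVisit_eq (row : List Int) : ∀ v q, bfsVisit v q row = (vAfter v row, q ++ appOf v row) := by
  induction row with
  | nil => intro v q; simp [bfsVisit, vAfter, appOf]
  | cons x t ih =>
    intro v q
    rcases h : PySem.List.pyGet? v x with _ | b
    · rw [bfsVisit_cons_none v q x t h, ih v q]
      simp only [vAfter, appOf]
      rw [bfsVisit_cons_none v [] x t h, ih v []]
    · cases b
      · rw [bfsVisit_cons_false v q x t h, ih _ (q ++ [x])]
        simp only [vAfter, appOf]
        rw [bfsVisit_cons_false v [] x t h]
        simp only [List.nil_append]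
        rw [ih _ [x]]
        simp only [List.cons_append, List.nil_append, List.append_assoc]
        rfl
      · rw [bfsVisit_cons_true v q x t h, ih v q]
        simp only [vAfter, appOf]
        rw [bfsVisit_cons_true v [] x t h, ih v []]

theorem vAfter_cons_false (v : List Bool) (x : Int) (t : List Int)
    (h : PySem.List.pyGet? v x = some false) :
    vAfter v (x :: t) = vAfter (PySem.List.pySetD v x true) t ∧
      appOf v (x :: t) = x :: appOf (PySem.List.pySetD v x true) t := by
  have h1 : bfsVisit v [] (x :: t) =
      (vAfter (PySem.List.pySetD v x true) t, [x] ++ appOf (PySem.List.pySetD v x true) t) :=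
    (bfsVisit_cons_false v [] x t h).trans (bfsVisit_eq t _ [x])
  constructor
  · show (bfsVisit v [] (x :: t)).1 = _
    rw [h1]
  · show (bfsVisit v [] (x :: t)).2 = _
    rw [h1]
    simp

theorem vAfter_cons_skip (v : List Bool) (x : Int) (t : List Int)
    (h : PySem.List.pyGet? v x ≠ some false) :
    vAfter v (x :: t) = vAfter v t ∧ appOf v (x :: t) = appOf v t := by
  have h0 : bfsVisit v [] (x :: t) = bfsVisit v [] t := by
    rcases h2 : PySem.List.pyGet? v x with _ | b
    · exact bfsVisit_cons_none v [] x t h2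
    · cases b
      · exact absurd h2 h
      · exact bfsVisit_cons_true v [] x t h2
  have h1 : bfsVisit v [] (x :: t) = (vAfter v t, [] ++ appOf v t) :=
    h0.trans (bfsVisit_eq t v [])
  constructor
  · show (bfsVisit v [] (x :: t)).1 = _
    rw [h1]
  · show (bfsVisit v [] (x :: t)).2 = _
    rw [h1]
    simp

theorem vAfter_length (row : List Int) : ∀ v, (vAfter v row).length = v.length := by
  induction row with
  | nil => intro v; simp [vAfter, bfsVisit]
  | cons x t ih =>
    intro v
    by_cases h : PySem.List.pyGet? v x = some false
    · rw [(vAfter_cons_false v x t h).1, ih, length_pySetD']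
    · rw [(vAfter_cons_skip v x t h).1, ih]

theorem appOf_sub (row : List Int) : ∀ v, ∀ i ∈ appOf v row, i ∈ row ∧ mk v i = false := by
  induction row with
  | nil => intro v i hi; simp [appOf, bfsVisit] at hi
  | cons x t ih =>
    intro v i hi
    by_cases h : PySem.List.pyGet? v x = some false
    · rw [(vAfter_cons_false v x t h).2] at hi
      rcases List.mem_cons.1 hi with rfl | hi
      · exact ⟨List.mem_cons_self .., by simp [mk, h]⟩
      · have h2 := ih (PySem.List.pySetD v x true) i hi
        refine ⟨List.mem_cons_of_mem _ h2.1, ?_⟩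
        cases hmk : mk v i
        · rfl
        · have := mk_mono_set v x i hmk
          rw [h2.2] at this
          exact absurd this (by simp)
    · rw [(vAfter_cons_skip v x t h).2] at hi
      have h2 := ih v i hi
      exact ⟨List.mem_cons_of_mem _ h2.1, h2.2⟩

theorem vAfter_mk (row : List Int) : ∀ (v : List Bool) (c : Int),
    (∀ i ∈ row, 0 ≤ i ∧ i < (v.length : Int)) → 0 ≤ c →
    mk (vAfter v row) c = (mk v c || decide (c ∈ appOf v row)) := by
  induction row with
  | nil => intro v c _ _; simp [vAfter, appOf, bfsVisit]
  | cons x t ih =>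
    intro v c hrow hc
    by_cases h : PySem.List.pyGet? v x = some false
    · obtain ⟨hv, ha⟩ := vAfter_cons_false v x t h
      rw [hv, ha]
      have hx := hrow x (List.mem_cons_self ..)
      have hlen : (PySem.List.pySetD v x true).length = v.length := length_pySetD' v x true
      rw [ih (PySem.List.pySetD v x true) c
        (fun i hi => by rw [hlen]; exact hrow i (List.mem_cons_of_mem _ hi)) hc]
      rw [mk_pySetD v x c hx.1 hc hx.2]
      simp only [List.mem_cons]
      cases hmv : mk v c <;> cases hd : decide (c = x) <;>
        simp_all
    · obtain ⟨hv, ha⟩ := vAfter_cons_skip v x t h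
      rw [hv, ha]
      exact ih v c (fun i hi => hrow i (List.mem_cons_of_mem _ hi)) hc

theorem pyGet?_in {α : Type} (v : List α) (c : Int) (h0 : 0 ≤ c) (h1 : c < (v.length : Int)) :
    PySem.List.pyGet? v c = some (v[c.toNat]'(by omega)) := by
  have hidx : PySem.List.pyIdx? v.length c = some c.toNat := by
    simp only [PySem.List.pyIdx?]
    rw [if_pos h0, if_pos h1]
  simp [PySem.List.pyGet?, hidx, List.getElem?_eq_getElem (show c.toNat < v.length by omega)]

theorem appOf_complete (row : List Int) : ∀ (v : List Bool) (i : Int),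
    (∀ j ∈ row, 0 ≤ j ∧ j < (v.length : Int)) → i ∈ row → 0 ≤ i → i < (v.length : Int) →
    mk v i = false → i ∈ appOf v row := by
  induction row with
  | nil => intro v i _ hi _ _ _; simp at hi
  | cons x t ihr =>
    intro v i hrow hi hi0 hil hmv
    by_cases h : PySem.List.pyGet? v x = some false
    · rw [(vAfter_cons_false v x t h).2]
      by_cases hix : i = x
      · subst hix; exact List.mem_cons_self ..
      · rcases List.mem_cons.1 hi with rfl | hit
        · exact absurd rfl hix
        · refine List.mem_cons_of_mem _ ?_
          refine ihr (PySem.List.pySetD v x true) i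
            (fun j hj => by rw [length_pySetD']; exact hrow j (List.mem_cons_of_mem _ hj))
            hit hi0 (by rw [length_pySetD']; exact hil) ?_
          rw [mk_pySetD v x i (hrow x (List.mem_cons_self ..)).1 hi0
            (hrow x (List.mem_cons_self ..)).2, hmv]
          simp [hix]
    · rw [(vAfter_cons_skip v x t h).2]
      rcases List.mem_cons.1 hi with rfl | hit
      · exfalso
        rw [pyGet?_in v i hi0 hil] at h
        have hm2 : mk v i = v[i.toNat]'(by omega) := mk_in v i hi0 hil
        rw [hmv] at hm2
        exact h (by rw [← hm2])
      · exact ihr v i (fun j hj => hrow j (List.mem_cons_of_mem _ hj)) hit hi0 hil hmv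

theorem vAfter_marks_row (row : List Int) (v : List Bool)
    (hrow : ∀ i ∈ row, 0 ≤ i ∧ i < (v.length : Int)) : ∀ i ∈ row, mk (vAfter v row) i = true := by
  intro i hi
  have hi' := hrow i hi
  rw [vAfter_mk row v i hrow hi'.1]
  cases hmv : mk v i
  · have := appOf_complete row v i hrow hi hi'.1 hi'.2 hmv
    simp [this]
  · simp

theorem reach_nonneg (g : List (List Int)) (v : List Bool) (HG : GoodG g) (a b : Int)
    (h : Reach g v a b) (ha : 0 ≤ a) : 0 ≤ b := by
  induction h with
  | refl => exact ha
  | tail h' e ih =>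
    obtain ⟨⟨r, hr, hmem⟩, _⟩ := e
    exact (HG r (PySem.List.mem_of_pyGet?_eq_some _ hr) _ hmem).1

theorem edge_mono (g : List (List Int)) (v v1 : List Bool) (app : List Int) (HG : GoodG g)
    (Ha : ∀ c : Int, 0 ≤ c → mk v1 c = (mk v c || decide (c ∈ app))) :
    ∀ x y : Int, Edge g v1 x y → Edge g v x y := by
  intro x y ⟨⟨r, hr, hmem⟩, hy⟩
  refine ⟨⟨r, hr, hmem⟩, ?_⟩
  have hy0 : (0 : Int) ≤ y := (HG r (PySem.List.mem_of_pyGet?_eq_some _ hr) _ hmem).1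
  have := Ha y hy0
  rw [hy] at this
  rcases Bool.or_eq_false_iff.1 this.symm with ⟨h1, _⟩
  exact h1

theorem edge_mono_set (g : List (List Int)) (v : List Bool) (i : Int) :
    ∀ x y : Int, Edge g (PySem.List.pySetD v i true) x y → Edge g v x y := by
  intro x y ⟨⟨r, hr, hmem⟩, hy⟩
  refine ⟨⟨r, hr, hmem⟩, ?_⟩
  cases hv : mk v y
  · rfl
  · rw [mk_mono_set v i y hv] at hy
    exact hy.symm ▸ rfl

theorem stepA_fwd (g : List (List Int)) (v v1 : List Bool) (row : List Int) (a : Int)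
    (rest app : List Int) (HG : GoodG g) (hrow : PySem.List.pyGet? g a = some row)
    (Ha : ∀ c : Int, 0 ≤ c → mk v1 c = (mk v c || decide (c ∈ app)))
    (Hc : ∀ i ∈ row, mk v1 i = true)
    (hav : mk v a = true)
    (u c : Int) (h : Reach g v u c) (hu : u = a ∨ u ∈ rest) (hu0 : 0 ≤ u) :
    mk v1 c = false → ∃ u', (u' ∈ rest ∨ u' ∈ app) ∧ Reach g v1 u' c := by
  induction h with
  | refl =>
    intro hc1
    rcases hu with rfl | hur
    · rw [Ha u hu0, hav] at hc1
      simp at hc1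
    · exact ⟨u, Or.inl hur, Relation.ReflTransGen.refl⟩
  | tail h' e ih =>
    rename_i b c'
    intro hc1
    obtain ⟨⟨rowb, hrowb, hcrow⟩, hcv⟩ := e
    have hb0 : (0 : Int) ≤ b := reach_nonneg g v HG u b h' hu0
    cases hb1 : mk v1 b
    · obtain ⟨u', hu', hr⟩ := ih hb1
      exact ⟨u', hu', hr.tail ⟨⟨rowb, hrowb, hcrow⟩, hc1⟩⟩
    · by_cases hba : b = a
      · subst hba
        rw [hrow] at hrowb
        cases Option.some.inj hrowb
        exact absurd (Hc c' hcrow) (by rw [hc1]; simp)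
      · cases hmvb : mk v b
        · have h2 := Ha b hb0
          rw [hb1, hmvb] at h2
          simp at h2
          exact ⟨b, Or.inr h2, Relation.ReflTransGen.single ⟨⟨rowb, hrowb, hcrow⟩, hc1⟩⟩
        · rcases Relation.ReflTransGen.cases_tail h' with heq | ⟨x, _, ex⟩
          · subst heq
            rcases hu with rfl | hur
            · exact absurd rfl hba
            · exact ⟨b, Or.inl hur, Relation.ReflTransGen.single ⟨⟨rowb, hrowb, hcrow⟩, hc1⟩⟩
          · exact absurd ex.2 (by rw [hmvb]; simp)

-- the A-side step lemma: processing one marked queue element preserves the reach-spec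

-- the A-side step lemma: processing one marked queue element preserves the reach-spec
theorem stepA (g : List (List Int)) (v v1 : List Bool) (row : List Int) (a : Int) (rest app : List Int)
    (HG : GoodG g) (ha0 : 0 ≤ a) (hav : mk v a = true) (hrow : PySem.List.pyGet? g a = some row)
    (Ha : ∀ c : Int, 0 ≤ c → mk v1 c = (mk v c || decide (c ∈ app)))
    (Hb : ∀ i ∈ app, i ∈ row ∧ mk v i = false)
    (Hc : ∀ i ∈ row, mk v1 i = true)
    (Hrest : ∀ u ∈ rest, 0 ≤ u)
    (c : Int) (hc : 0 ≤ c) :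
    (mk v1 c = true ∨ ∃ u ∈ rest ++ app, Reach g v1 u c) ↔
      (mk v c = true ∨ ∃ u ∈ a :: rest, Reach g v u c) := by
  have hmono : ∀ x y, Edge g v1 x y → Edge g v x y := edge_mono g v v1 app HG Ha
  constructor
  · rintro (h1 | ⟨u, hu, hr⟩)
    · rw [Ha c hc] at h1
      rcases Bool.or_eq_true_iff.1 h1 with h2 | h2
      · exact Or.inl h2
      · have hcapp : c ∈ app := of_decide_eq_true h2
        obtain ⟨hcrow, hcf⟩ := Hb c hcapp
        exact Or.inr ⟨a, List.mem_cons_self .., Relation.ReflTransGen.single ⟨⟨row, hrow, hcrow⟩, hcf⟩⟩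
    · rcases List.mem_append.1 hu with hu1 | hu1
      · exact Or.inr ⟨u, List.mem_cons_of_mem _ hu1, Relation.ReflTransGen.mono hmono hr⟩
      · obtain ⟨hurow, huf⟩ := Hb u hu1
        exact Or.inr ⟨a, List.mem_cons_self ..,
          Relation.ReflTransGen.head ⟨⟨row, hrow, hurow⟩, huf⟩ (Relation.ReflTransGen.mono hmono hr)⟩
  · rintro (h1 | ⟨u, hu, hr⟩)
    · refine Or.inl ?_
      rw [Ha c hc, h1]
      simp
    · cases hc1 : mk v1 c
      · have hu0 : (0 : Int) ≤ u := by
          rcases List.mem_cons.1 hu with rfl | hu2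
          · exact ha0
          · exact Hrest u hu2
        obtain ⟨u', hu', hr'⟩ := stepA_fwd g v v1 row a rest app HG hrow Ha Hc hav u c hr
          (by rcases List.mem_cons.1 hu with rfl | h2; exact Or.inl rfl; exact Or.inr h2) hu0 hc1
        refine Or.inr ⟨u', List.mem_append.2 ?_, hr'⟩
        rcases hu' with h2 | h2
        · exact Or.inl h2
        · exact Or.inr h2
      · exact Or.inl rfl

-- the B-side step lemma: popping an unmarked stack element and pushing its row preserves the spec
theorem stepB_fwd (g : List (List Int)) (v : List Bool) (row : List Int) (u0 : Int)
    (rest : List Int) (HG : GoodG g) (hu0 : 0 ≤ u0) (hu0l : u0 < (v.length : Int))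
    (hrow : PySem.List.pyGet? g u0 = some row)
    (u c : Int) (h : Reach g v u c) (hu : u = u0 ∨ u ∈ rest) (humk : mk v u = false) (hun : 0 ≤ u) :
    mk (PySem.List.pySetD v u0 true) c = false →
      ∃ u', ((u' ∈ rest ∨ u' ∈ row) ∧ mk (PySem.List.pySetD v u0 true) u' = false) ∧
        Reach g (PySem.List.pySetD v u0 true) u' c := by
  induction h with
  | refl =>
    intro hc1
    rcases hu with hequ | hur
    · rw [hequ] at hc1
      rw [mk_pySetD v u0 u0 hu0 hu0 hu0l] at hc1
      simp at hc1
    · exact ⟨u, ⟨Or.inl hur, hc1⟩, Relation.ReflTransGen.refl⟩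
  | tail h' e ih =>
    rename_i b c'
    intro hc1
    obtain ⟨⟨rowb, hrowb, hcrow⟩, hcv⟩ := e
    have hb0 : (0 : Int) ≤ b := reach_nonneg g v HG u b h' hun
    cases hb1 : mk (PySem.List.pySetD v u0 true) b
    · obtain ⟨u', hu', hr⟩ := ih hb1
      exact ⟨u', hu', hr.tail ⟨⟨rowb, hrowb, hcrow⟩, hc1⟩⟩
    · rw [mk_pySetD v u0 b hu0 hb0 hu0l] at hb1
      rcases Bool.or_eq_true_iff.1 hb1 with hb2 | hb2
      · rcases Relation.ReflTransGen.cases_tail h' with heq | ⟨x, _, ex⟩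
        · subst heq
          exact absurd hb2 (by rw [humk]; simp)
        · exact absurd ex.2 (by rw [hb2]; simp)
      · have hbu : b = u0 := of_decide_eq_true hb2
        subst hbu
        rw [hrow] at hrowb
        cases Option.some.inj hrowb
        exact ⟨c', ⟨Or.inr hcrow, hc1⟩, Relation.ReflTransGen.refl⟩

theorem stepB (g : List (List Int)) (v : List Bool) (row : List Int) (u0 : Int) (rest : List Int)
    (HG : GoodG g) (hu0 : 0 ≤ u0) (hu0l : u0 < (v.length : Int)) (hu0v : mk v u0 = false)
    (hrow : PySem.List.pyGet? g u0 = some row)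
    (Hrest : ∀ u ∈ rest, 0 ≤ u)
    (c : Int) (hc : 0 ≤ c) :
    (mk (PySem.List.pySetD v u0 true) c = true ∨
        ∃ u ∈ rest ++ row, mk (PySem.List.pySetD v u0 true) u = false ∧
          Reach g (PySem.List.pySetD v u0 true) u c) ↔
      (mk v c = true ∨ ∃ u, (u = u0 ∨ u ∈ rest) ∧ mk v u = false ∧ Reach g v u c) := by
  have hmono : ∀ x y, Edge g (PySem.List.pySetD v u0 true) x y → Edge g v x y :=
    edge_mono_set g v u0
  have hmkmono : ∀ u : Int, mk (PySem.List.pySetD v u0 true) u = false → mk v u = false := by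
    intro u hmk
    cases hv : mk v u
    · rfl
    · rw [mk_mono_set v u0 u hv] at hmk
      exact hmk
  constructor
  · rintro (h1 | ⟨u, hu, humk, hr⟩)
    · rw [mk_pySetD v u0 c hu0 hc hu0l] at h1
      rcases Bool.or_eq_true_iff.1 h1 with h2 | h2
      · exact Or.inl h2
      · have : c = u0 := of_decide_eq_true h2
        subst this
        exact Or.inr ⟨c, Or.inl rfl, hu0v, Relation.ReflTransGen.refl⟩
    · have humk' : mk v u = false := hmkmono u humk
      rcases List.mem_append.1 hu with hu1 | hu1
      · exact Or.inr ⟨u, Or.inr hu1, humk', Relation.ReflTransGen.mono hmono hr⟩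
      · exact Or.inr ⟨u0, Or.inl rfl, hu0v,
          Relation.ReflTransGen.head ⟨⟨row, hrow, hu1⟩, humk'⟩ (Relation.ReflTransGen.mono hmono hr)⟩
  · rintro (h1 | ⟨u, hu, humk, hr⟩)
    · exact Or.inl (mk_mono_set v u0 c h1)
    · cases hc1 : mk (PySem.List.pySetD v u0 true) c
      · have hun : (0 : Int) ≤ u := by
          rcases hu with rfl | hu2
          · exact hu0
          · exact Hrest u hu2
        obtain ⟨u', ⟨hu', hu'mk⟩, hr'⟩ :=
          stepB_fwd g v row u0 rest HG hu0 hu0l hrow u c hr hu humk hun hc1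
        refine Or.inr ⟨u', List.mem_append.2 hu', hu'mk, hr'⟩
      · exact Or.inl rfl

theorem bfsLoop_spec (g : List (List Int)) (HG : GoodG g) : ∀ (N : Nat) (v : List Bool) (q : List Int),
    v.count false + q.length ≤ N → v.length = g.length →
    (∀ u ∈ q, 0 ≤ u ∧ u < (g.length : Int) ∧ mk v u = true) →
    (bfsLoop g v q).length = v.length ∧
      ∀ c : Int, 0 ≤ c → (mk (bfsLoop g v q) c = true ↔ (mk v c = true ∨ ∃ u ∈ q, Reach g v u c)) := by
  intro N
  induction N with
  | zero =>
    intro v q hm _ _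
    have : q = [] := List.eq_nil_of_length_eq_zero (by omega)
    subst this
    simp [bfsLoop]
  | succ N ihN =>
    intro v q hm hlen Hq
    match q with
    | [] => simp [bfsLoop]
    | a :: rest =>
      obtain ⟨ha0, hal, hav⟩ := Hq a (List.mem_cons_self ..)
      have hant : a.toNat < g.length := by omega
      have hrow : PySem.List.pyGet? g a = some (g[a.toNat]'hant) := pyGet?_in g a ha0 hal
      set row := g[a.toNat]'hant with hrowdef
      have hrowmem : row ∈ g := List.getElem_mem hant
      have hrange : ∀ i ∈ row, 0 ≤ i ∧ i < (g.length : Int) := HG row hrowmem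
      have hrangev : ∀ i ∈ row, 0 ≤ i ∧ i < (v.length : Int) := by
        intro i hi; rw [hlen]; exact hrange i hi
      have hvisit : bfsVisit v rest row = (vAfter v row, rest ++ appOf v row) :=
        bfsVisit_eq row v rest
      have hred : bfsLoop g v (a :: rest) =
          bfsLoop g (vAfter v row) (rest ++ appOf v row) := by
        rw [bfsLoop, hrow]
        show bfsLoop g (bfsVisit v rest row).1 (bfsVisit v rest row).2 = _
        rw [hvisit]
      have hmeas : (vAfter v row).count false + (appOf v row).length ≤ v.count false := by
        have := pv_visit_measure row v []
        rw [bfsVisit_eq row v []] at this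
        simpa [vAfter] using this
      have hlen1 : (vAfter v row).length = v.length := vAfter_length row v
      have happold := appOf_sub row v
      have ih := ihN (vAfter v row) (rest ++ appOf v row)
        (by simp only [List.length_append, List.length_cons] at hm ⊢; omega)
        (by rw [hlen1, hlen])
        (by
          intro u hu
          rcases List.mem_append.1 hu with hu1 | hu1
          · obtain ⟨h1, h2, h3⟩ := Hq u (List.mem_cons_of_mem _ hu1)
            refine ⟨h1, h2, ?_⟩
            rw [vAfter_mk row v u hrangev h1, h3]
            simp
          · obtain ⟨hur, _⟩ := happold u hu1
            obtain ⟨h1, h2⟩ := hrange u hur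
            exact ⟨h1, h2, vAfter_marks_row row v hrangev u hur⟩)
      have hstep := stepA g v (vAfter v row) row a rest (appOf v row) HG ha0 hav hrow
        (fun c hc => vAfter_mk row v c hrangev hc)
        (appOf_sub row v)
        (vAfter_marks_row row v hrangev)
        (fun u hu => (Hq u (List.mem_cons_of_mem _ hu)).1)
      constructor
      · rw [hred, ih.1, hlen1]
      · intro c hc
        rw [hred, ih.2 c hc]
        exact hstep c hc

theorem dfsLoop_spec (g : List (List Int)) (HG : GoodG g) : ∀ (N : Nat) (v : List Bool) (st : List Int),
    v.count false * (pvMaxRow g + 1) + st.length ≤ N → v.length = g.length →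
    (∀ u ∈ st, 0 ≤ u ∧ u < (g.length : Int)) →
    (dfsLoop g v st).length = v.length ∧
      ∀ c : Int, 0 ≤ c → (mk (dfsLoop g v st) c = true ↔
        (mk v c = true ∨ ∃ u ∈ st, mk v u = false ∧ Reach g v u c)) := by
  intro N
  induction N with
  | zero =>
    intro v st hm _ _
    have : st = [] := List.eq_nil_of_length_eq_zero (by omega)
    subst this
    simp [dfsLoop]
  | succ N ihN =>
    intro v st hm hlen Hst
    match st with
    | [] => simp [dfsLoop]
    | x :: xs =>
      set node := (x :: xs).getLast (List.cons_ne_nil x xs) with hnodedef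
      have hnodemem : node ∈ x :: xs := List.getLast_mem _
      obtain ⟨hn0, hnl⟩ := Hst node hnodemem
      have hnlv : node < (v.length : Int) := by rw [hlen]; exact hnl
      have hnnt : node.toNat < v.length := by omega
      have hget : PySem.List.pyGet? v node = some (v[node.toNat]'hnnt) := pyGet?_in v node hn0 hnlv
      have hmkn : mk v node = v[node.toNat]'hnnt := mk_in v node hn0 hnlv
      have hsplit : (x :: xs).dropLast ++ [node] = x :: xs := List.dropLast_append_getLast _
      have hmem_iff : ∀ u : Int, u ∈ x :: xs ↔ u ∈ (x :: xs).dropLast ∨ u = node := by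
        intro u
        conv_lhs => rw [← hsplit]
        simp [List.mem_append]
      have Hrest : ∀ u ∈ (x :: xs).dropLast, 0 ≤ u ∧ u < (g.length : Int) := by
        intro u hu
        exact Hst u ((hmem_iff u).2 (Or.inl hu))
      cases hb : v[node.toNat]'hnnt
      · -- unmarked: mark it and push its row
        have hgetf : PySem.List.pyGet? v node = some false := by rw [hget, hb]
        have hgnt : node.toNat < g.length := by omega
        have hgrow : PySem.List.pyGet? g node = some (g[node.toNat]'hgnt) := pyGet?_in g node hn0 hnl
        set row := g[node.toNat]'hgnt with hrowdef
        have hrowmem : row ∈ g := List.getElem_mem hgnt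
        have hred : dfsLoop g v (x :: xs) =
            dfsLoop g (PySem.List.pySetD v node true) ((x :: xs).dropLast ++ row) := by
          rw [dfsLoop, hgetf]
          rw [hgrow]
        have hflip := pv_flip v node hgetf
        have hrl := pv_rowLen_le g node row hgrow
        have ih := ihN (PySem.List.pySetD v node true) ((x :: xs).dropLast ++ row)
          (by
            simp only [List.length_append, List.length_dropLast, List.length_cons] at hm ⊢
            have hexp : (v.count false) * (pvMaxRow g + 1) =
                ((PySem.List.pySetD v node true).count false + 1) * (pvMaxRow g + 1) := by
              rw [hflip]
            rw [hexp] at hm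
            have : ((PySem.List.pySetD v node true).count false + 1) * (pvMaxRow g + 1) =
                (PySem.List.pySetD v node true).count false * (pvMaxRow g + 1) +
                  (pvMaxRow g + 1) := by ring
            omega)
          (by rw [length_pySetD', hlen])
          (by
            intro u hu
            rcases List.mem_append.1 hu with hu1 | hu1
            · exact Hrest u hu1
            · exact HG row hrowmem u hu1)
        have hstep := stepB g v row node ((x :: xs).dropLast) HG hn0 hnlv
          (by rw [hmkn, hb]) hgrow (fun u hu => (Hrest u hu).1)
        constructor
        · rw [hred, ih.1, length_pySetD']
        · intro c hc
          rw [hred, ih.2 c hc, hstep c hc]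
          constructor
          · rintro (h1 | ⟨u, hu, h2, h3⟩)
            · exact Or.inl h1
            · exact Or.inr ⟨u, (hmem_iff u).2 (by tauto), h2, h3⟩
          · rintro (h1 | ⟨u, hu, h2, h3⟩)
            · exact Or.inl h1
            · rcases (hmem_iff u).1 hu with hu1 | hu1
              · exact Or.inr ⟨u, Or.inr hu1, h2, h3⟩
              · exact Or.inr ⟨u, Or.inl hu1, h2, h3⟩
      · -- already marked: just pop
        have hgett : PySem.List.pyGet? v node = some true := by rw [hget, hb]
        have hred : dfsLoop g v (x :: xs) = dfsLoop g v ((x :: xs).dropLast) := by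
          rw [dfsLoop, hgett]

        have ih := ihN v ((x :: xs).dropLast)
          (by simp only [List.length_dropLast, List.length_cons] at hm ⊢; omega)
          hlen Hrest
        constructor
        · rw [hred, ih.1]
        · intro c hc
          rw [hred, ih.2 c hc]
          constructor
          · rintro (h1 | ⟨u, hu, h2, h3⟩)
            · exact Or.inl h1
            · exact Or.inr ⟨u, (hmem_iff u).2 (Or.inl hu), h2, h3⟩
          · rintro (h1 | ⟨u, hu, h2, h3⟩)
            · exact Or.inl h1
            · rcases (hmem_iff u).1 hu with hu1 | hu1
              · exact Or.inr ⟨u, hu1, h2, h3⟩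
              · subst hu1
                rw [hmkn, hb] at h2
                exact absurd h2 (by simp)

theorem count_eq_sum (l : List Bool) :
    ((l.map (fun b => if b then (1 : Int) else 0)).sum) = ((l.count true : Nat) : Int) := by
  induction l with
  | nil => simp
  | cons b t ih =>
    cases b <;> simp [ih] <;> omega

-- ===== VERDICT (by name: the statement is the Claim_ definition above) =====
theorem bfsVisit_all_marked (row : List Int) : ∀ (v : List Bool) (q : List Int),
    (∀ i ∈ row, PySem.List.pyGet? v i = some true) → bfsVisit v q row = (v, q) := by
  induction row with
  | nil => intro v q _; simp [bfsVisit]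
  | cons x t ih =>
    intro v q hall
    rw [bfsVisit_cons_true v q x t (hall x (List.mem_cons_self ..))]
    exact ih v q (fun i hi => hall i (List.mem_cons_of_mem _ hi))

theorem dfsLoop_marked (g : List (List Int)) : ∀ (N : Nat) (v : List Bool) (st : List Int),
    st.length ≤ N → (∀ i ∈ st, PySem.List.pyGet? v i = some true) → dfsLoop g v st = v := by
  intro N
  induction N with
  | zero =>
    intro v st hm _
    have : st = [] := List.eq_nil_of_length_eq_zero (by omega)
    subst this
    simp [dfsLoop]
  | succ N ihN =>
    intro v st hm hall
    match st with
    | [] => simp [dfsLoop]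
    | x :: xs =>
      have hget : PySem.List.pyGet? v ((x :: xs).getLast (List.cons_ne_nil x xs)) = some true :=
        hall _ (List.getLast_mem _)
      rw [dfsLoop, hget]
      refine ihN v ((x :: xs).dropLast) (by simp at hm ⊢; omega) ?_
      intro i hi
      exact hall i (List.mem_of_mem_dropLast hi)

theorem result_eq (g : List (List Int)) (vis : List Bool) (st n : Int) (row0 : List Int)
    (hrow0 : PySem.List.pyGet? g st = some row0)
    (hkey : bfsLoop g (PySem.List.pySetD vis st true) [st] =
      dfsLoop g (PySem.List.pySetD vis st true) row0) :
    bfs g vis st n = bfs_alt g vis st n := by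
  rw [bfs, bfs_alt, hrow0]
  simp only [hkey, count_eq_sum]
  have harith : ∀ m : Int, |m - (n - m)| = |2 * m - n| := by
    intro m
    have : m - (n - m) = 2 * m - n := by ring
    rw [this]
  exact harith _

theorem bfs_spec : Claim_equal_bfs := by
  intro g vis st n _ hpre
  unfold Spec_bfs
  rcases hpre with ⟨hlen, hs0, hsl, HGh⟩ | ⟨hgin, hvin, hshort⟩
  · -- well-formed case: both searches mark exactly the reachable cells
    have HG : GoodG g := HGh
    have hsnt : st.toNat < g.length := by omega
    have hrow0 : PySem.List.pyGet? g st = some (g[st.toNat]'hsnt) := pyGet?_in g st hs0 hsl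
    set v1 := PySem.List.pySetD vis st true with hv1def
    set row0 := g[st.toNat]'hsnt with hrow0def
    have hv1len : v1.length = g.length := by rw [hv1def, length_pySetD', hlen]
    have hmkstart : mk v1 st = true := by
      rw [hv1def, mk_pySetD vis st st hs0 hs0 (by rw [hlen]; exact hsl)]
      simp
    have specA := bfsLoop_spec g HG (v1.count false + 1) v1 [st]
      (by simp) hv1len
      (fun u hu => by
        rcases List.mem_singleton.1 hu with rfl
        exact ⟨hs0, hsl, hmkstart⟩)
    have specB := dfsLoop_spec g HG (v1.count false * (pvMaxRow g + 1) + row0.length) v1 row0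
      le_rfl hv1len
      (fun u hu => HG row0 (List.getElem_mem hsnt) u hu)
    have hbridge : ∀ c : Int,
        (mk v1 c = true ∨ ∃ u ∈ [st], Reach g v1 u c) ↔
          (mk v1 c = true ∨ ∃ u ∈ row0, mk v1 u = false ∧ Reach g v1 u c) := by
      intro c
      constructor
      · rintro (h1 | ⟨u, hu, hr⟩)
        · exact Or.inl h1
        · rcases List.mem_singleton.1 hu with rfl
          rcases Relation.ReflTransGen.cases_head hr with heq | ⟨w, e, h2⟩
          · subst heq
            exact Or.inl hmkstart
          · obtain ⟨⟨r, hr2, hw⟩, hwf⟩ := e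
            rw [hrow0] at hr2
            cases Option.some.inj hr2
            exact Or.inr ⟨w, hw, hwf, h2⟩
      · rintro (h1 | ⟨u, hu, huf, hr⟩)
        · exact Or.inl h1
        · exact Or.inr ⟨st, List.mem_singleton_self _,
            Relation.ReflTransGen.head ⟨⟨row0, hrow0, hu⟩, huf⟩ hr⟩
    have hkey : bfsLoop g v1 [st] = dfsLoop g v1 row0 := by
      apply List.ext_getElem (by rw [specA.1, specB.1])
      intro j h1 h2
      have hc0 : (0 : Int) ≤ (j : Int) := Int.natCast_nonneg j
      have e1 : mk (bfsLoop g v1 [st]) (j : Int) = (bfsLoop g v1 [st])[j] := mk_natCast _ j h1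
      have e2 : mk (dfsLoop g v1 row0) (j : Int) = (dfsLoop g v1 row0)[j] := mk_natCast _ j h2
      have hiff : (mk (bfsLoop g v1 [st]) (j : Int) = true) ↔
          (mk (dfsLoop g v1 row0) (j : Int) = true) := by
        rw [specA.2 (j : Int) hc0, specB.2 (j : Int) hc0]
        exact hbridge (j : Int)
      rw [e1, e2] at hiff
      cases hA : (bfsLoop g v1 [st])[j] <;> cases hB : (dfsLoop g v1 row0)[j] <;>
        simp_all
    exact result_eq g vis st n row0 hrow0 hkey
  · -- depth-one case: every neighbour of start is already visited, both loops stop at once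
    rcases hrowex : PySem.List.pyGet? g st with _ | row0
    · exact absurd ((PySem.List.pyGet?_eq_none_iff g st).1 hrowex) (by simpa using hgin)
    · have hshort' : ∀ i ∈ row0,
          PySem.List.pyGet? (PySem.List.pySetD vis st true) i = some true := by
        intro i hi
        exact hshort i (by rw [hrowex]; simpa using hi)
      have hA : bfsLoop g (PySem.List.pySetD vis st true) [st] = PySem.List.pySetD vis st true := by
        rw [bfsLoop, hrowex]
        show bfsLoop g (bfsVisit (PySem.List.pySetD vis st true) [] row0).1
          (bfsVisit (PySem.List.pySetD vis st true) [] row0).2 = _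
        rw [bfsVisit_all_marked row0 _ [] hshort']
        rw [bfsLoop]
      have hB : dfsLoop g (PySem.List.pySetD vis st true) row0 = PySem.List.pySetD vis st true :=
        dfsLoop_marked g row0.length _ row0 le_rfl hshort'
      exact result_eq g vis st n row0 hrowex (hA.trans hB.symm)
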